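-- pv_equiv track=rewrite | github.com/Mi524/common_utils_data | src/common_utils_data/nlp_functions.py | encript_number_pat
-- ===== SOURCE A (Python) =====
-- def encript_number_pat(text):
--     if type(text) == str and text.strip() != '':
--         result = ""
--
--         number_counter = 0
--
--         new_text = str(text)
--         for c in new_text:
--             if c.isnumeric() == True:
--                 number_counter += 1
--                 if number_counter > 3 :
--                     result += '*'
--                 else:
--                     result += c
--             else:
--                 number_counter = 0
--                 result += c
--
--         #判断是否纯数字，如果是，后面需要rstrip('.0')
--         if type(text) != str :
--             return result.rstrip('.0')
--         else:
--             return result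
--     else:
--         return text
-- ===== SOURCE B (Python) =====
-- from itertools import groupby
--
-- def encript_number_pat(text):
--     if type(text) == str and text.strip() != '':
--         parts = []
--         for is_num, grp in groupby(text, key=str.isnumeric):
--             run = ''.join(grp)
--             if is_num:
--                 parts.append(run[:3] + '*' * (len(run) - 3))
--             else:
--                 parts.append(run)
--         return ''.join(parts)
--     else:
--         return text
-- ===== Notes on version B (the rewrite author's own statement) =====
-- stated objective: idiomatic
-- what changed: Replaces the character-by-character counter loop with itertools.groupby splitting the string into maximal numeric/non-numeric runs, masking each numeric run past its third character wholesale.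
import Mathlib
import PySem

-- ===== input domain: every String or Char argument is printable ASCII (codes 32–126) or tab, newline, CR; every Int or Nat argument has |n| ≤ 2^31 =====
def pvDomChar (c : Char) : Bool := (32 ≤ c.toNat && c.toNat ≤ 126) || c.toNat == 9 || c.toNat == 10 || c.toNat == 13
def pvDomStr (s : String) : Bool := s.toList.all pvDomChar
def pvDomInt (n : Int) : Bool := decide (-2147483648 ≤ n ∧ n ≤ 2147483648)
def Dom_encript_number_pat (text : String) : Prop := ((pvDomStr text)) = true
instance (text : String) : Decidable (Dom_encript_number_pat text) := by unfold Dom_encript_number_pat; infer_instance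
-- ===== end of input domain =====

-- B replaces A's per-character counter loop by splitting the text into maximal numeric/
-- non-numeric runs (groupby) and masking each numeric run past its third character (idiomatic).


-- ===== PORT A =====
-- `type(text) == str` is always true here; `c.isnumeric()` coincides with
-- PySem.Chars.isdigit on the printable-ASCII domain (exact there).
def encNumStep (st : List Char × Nat) (c : Char) : List Char × Nat :=
  if PySem.Chars.isdigit c then
    let k := st.2 + 1
    (st.1 ++ [if k > 3 then '*' else c], k)
  else
    (st.1 ++ [c], 0)

def encript_number_pat (text : String) : String :=
  if PySem.Str.strip text = "" then text
  else String.ofList ((text.toList.foldl encNumStep ([], 0)).1)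

-- ===== PORT B =====
def encMaskRun (run : List Char) : List Char :=
  if (run.head?.map PySem.Chars.isdigit).getD false then
    run.take 3 ++ List.replicate (run.length - 3) '*'
  else run

def encRuns : List Char → List Char
  | [] => []
  | c :: cs =>
    let p := cs.span (fun d => PySem.Chars.isdigit d == PySem.Chars.isdigit c)
    encMaskRun (c :: p.1) ++ encRuns p.2
termination_by l => l.length
decreasing_by
  simp only [List.span_eq_takeWhile_dropWhile]
  have := List.length_dropWhile_le (fun d => PySem.Chars.isdigit d == PySem.Chars.isdigit c) cs
  simp only [List.length_cons]
  omega

def encript_number_pat_alt (text : String) : String :=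
  if PySem.Str.strip text = "" then text
  else String.ofList (encRuns text.toList)

-- ===== PRECONDITION & SPEC =====
def Spec_encript_number_pat (text : String) (out : String) : Prop := out = encript_number_pat_alt text
instance (text : String) (out : String) : Decidable (Spec_encript_number_pat text out) := by unfold Spec_encript_number_pat; infer_instance

-- ===== CLAIM (what is proved, stated in full; the proofs are below) =====
def Claim_equal_encript_number_pat : Prop := ∀ (text : String), Dom_encript_number_pat text → Spec_encript_number_pat text (encript_number_pat text)

-- ===== LEMMAS AND PROOFS =====

/-- A's loop, restated as a direct recursion carrying only the digit counter. -/
def encMaskA : Nat → List Char → List Char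
  | _, [] => []
  | k, c :: cs =>
    if PySem.Chars.isdigit c then (if k + 1 > 3 then '*' else c) :: encMaskA (k + 1) cs
    else c :: encMaskA 0 cs

theorem encFoldl_eq_maskA (cs : List Char) : ∀ (res : List Char) (k : Nat),
    (cs.foldl encNumStep (res, k)).1 = res ++ encMaskA k cs := by
  induction cs with
  | nil => intro res k; simp [encMaskA]
  | cons c cs ih =>
    intro res k
    by_cases h : PySem.Chars.isdigit c = true
    · simp [encNumStep, h, encMaskA, ih]
    · simp [encNumStep, h, encMaskA, ih]

theorem encMaskA_reset (k : Nat) (cs : List Char)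
    (h : ∀ d ∈ cs.head?, PySem.Chars.isdigit d = false) :
    encMaskA k cs = encMaskA 0 cs := by
  cases cs with
  | nil => rfl
  | cons c t => simp [encMaskA, h c (by simp)]

theorem encMaskA_nondigits (run : List Char) : ∀ (rest : List Char),
    (∀ c ∈ run, PySem.Chars.isdigit c = false) →
    encMaskA 0 (run ++ rest) = run ++ encMaskA 0 rest := by
  induction run with
  | nil => intro rest _; rfl
  | cons c t ih =>
    intro rest h
    simp [encMaskA, h c (by simp), ih rest (fun d hd => h d (by simp [hd]))]

theorem encMaskA_digits (run : List Char) : ∀ (k : Nat) (rest : List Char),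
    (∀ c ∈ run, PySem.Chars.isdigit c = true) →
    encMaskA k (run ++ rest) =
      run.take (3 - k) ++ List.replicate (run.length - (3 - k)) '*'
        ++ encMaskA (k + run.length) rest := by
  induction run with
  | nil => intro k rest _; simp
  | cons c t ih =>
    intro k rest h
    have hc : PySem.Chars.isdigit c = true := h c (by simp)
    have iht := ih (k + 1) rest (fun d hd => h d (by simp [hd]))
    by_cases hk : k + 1 > 3
    · have h1 : 3 - k = 0 := by omega
      have h2 : 3 - (k + 1) = 0 := by omega
      simp only [List.cons_append, encMaskA, hc, if_pos hk, iht, h1, h2, List.take_zero,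
        Nat.sub_zero, List.nil_append, List.length_cons, List.replicate_succ, List.cons_append]
      rw [show k + 1 + t.length = k + (t.length + 1) by omega]
      simp
    · have h1 : 3 - k = (3 - (k + 1)) + 1 := by omega
      simp only [List.cons_append, encMaskA, hc, if_neg hk, iht, h1, List.take_succ_cons,
        List.length_cons, List.cons_append]
      rw [show t.length + 1 - (3 - (k + 1) + 1) = t.length - (3 - (k + 1)) by omega,
        show k + 1 + t.length = k + (t.length + 1) by omega]
      simp

theorem encMaskA_eq_runs (cs : List Char) : encMaskA 0 cs = encRuns cs := by
  induction cs using encRuns.induct with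
  | case1 => rw [encRuns]; rfl
  | case2 c cs p ih =>
    have hspan : p = (cs.takeWhile (fun d => PySem.Chars.isdigit d == PySem.Chars.isdigit c),
        cs.dropWhile (fun d => PySem.Chars.isdigit d == PySem.Chars.isdigit c)) := by
      rw [show p = cs.span (fun d => PySem.Chars.isdigit d == PySem.Chars.isdigit c) from rfl,
        List.span_eq_takeWhile_dropWhile]
    rw [encRuns]
    show encMaskA 0 (c :: cs) = encMaskRun (c :: p.1) ++ encRuns p.2
    rw [hspan] at ih ⊢
    set q := fun d => PySem.Chars.isdigit d == PySem.Chars.isdigit c with hq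
    have hsplit : c :: cs = (c :: cs.takeWhile q) ++ cs.dropWhile q := by
      simp [List.takeWhile_append_dropWhile]
    by_cases hc : PySem.Chars.isdigit c = true
    · -- numeric run
      have hall : ∀ d ∈ c :: cs.takeWhile q, PySem.Chars.isdigit d = true := by
        intro d hd
        rcases List.mem_cons.mp hd with h | h
        · simpa [h] using hc
        · have := List.mem_takeWhile_imp h
          simpa [hq, hc] using this
      have hhead : ∀ d ∈ (cs.dropWhile q).head?, PySem.Chars.isdigit d = false := by
        intro d hd
        have hnd : q d = false := by
          cases hdw : cs.dropWhile q with
          | nil => simp [hdw] at hd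
          | cons e t =>
            simp [hdw] at hd
            subst hd
            have hne : cs.dropWhile q ≠ [] := by simp [hdw]
            have := List.head_dropWhile_not q hne
            simpa [hdw] using this
        simpa [hq, hc] using hnd
      rw [hsplit, encMaskA_digits _ 0 _ hall, encMaskA_reset _ _ hhead, ih]
      simp [encMaskRun, hc]
    · -- non-numeric run
      have hall : ∀ d ∈ c :: cs.takeWhile q, PySem.Chars.isdigit d = false := by
        intro d hd
        rcases List.mem_cons.mp hd with h | h
        · simpa [h] using hc
        · have := List.mem_takeWhile_imp h
          simpa [hq, hc] using this
      rw [hsplit, encMaskA_nondigits _ _ hall, ih]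
      simp [encMaskRun, hc]

-- ===== VERDICT (by name: the statement is the Claim_ definition above) =====
theorem encript_number_pat_spec : Claim_equal_encript_number_pat := by
  intro text _
  unfold Spec_encript_number_pat encript_number_pat encript_number_pat_alt
  by_cases h : PySem.Str.strip text = ""
  · simp [h]
  · simp [h, encFoldl_eq_maskA, encMaskA_eq_runs]
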